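-- pv_equiv track=rewrite | github.com/wendi1015/myTransformer | data_hf.py | _parse_article_summary
-- ===== SOURCE A (Python) =====
-- from typing import Dict, Iterator, List, Tuple, Any, Optional
--
-- def _parse_article_summary(raw: str) -> Tuple[str, str]:
--     lines = [ln.strip() for ln in raw.splitlines()]
--     highlights, article_lines, in_high = [], [], False
--     for ln in lines:
--         if not ln:
--             continue
--         if ln.lower().startswith("@highlight"):
--             in_high = True
--             continue
--         (highlights if in_high else article_lines).append(ln)
--     return " ".join(article_lines).strip(), " ".join(highlights).strip()
-- ===== SOURCE B (Python) =====
-- def _parse_article_summary(raw):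
--     lines = [ln.strip() for ln in raw.splitlines()]
--     def is_high(ln):
--         return ln.lower().startswith("@highlight")
--     boundary = next((i for i, ln in enumerate(lines) if is_high(ln)), len(lines))
--     article_lines = [ln for ln in lines[:boundary] if ln]
--     highlights = [ln for ln in lines[boundary:] if ln and not is_high(ln)]
--     return " ".join(article_lines).strip(), " ".join(highlights).strip()
-- ===== Notes on version B (the rewrite author's own statement) =====
-- stated objective: alternative
-- what changed: Replaces A's single stateful flag-driven loop with a find-the-boundary step (first '@highlight' line, or end of list) followed by two stateless filtered passes over the slices before and after it.
import Mathlib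
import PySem

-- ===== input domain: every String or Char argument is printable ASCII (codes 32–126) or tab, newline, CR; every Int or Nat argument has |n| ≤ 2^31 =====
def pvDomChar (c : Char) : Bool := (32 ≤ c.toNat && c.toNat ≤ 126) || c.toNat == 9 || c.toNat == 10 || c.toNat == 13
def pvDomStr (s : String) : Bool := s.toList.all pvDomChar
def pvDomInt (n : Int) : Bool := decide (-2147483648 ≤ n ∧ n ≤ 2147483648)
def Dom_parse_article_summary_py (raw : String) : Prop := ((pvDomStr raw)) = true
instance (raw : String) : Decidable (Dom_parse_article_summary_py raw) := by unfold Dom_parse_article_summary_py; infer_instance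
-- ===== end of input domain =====

-- B replaces A's stateful flag-driven loop by a boundary split (takeWhile/dropWhile at the
-- first '@highlight' line) followed by two stateless filtered passes: same cost, different decomposition.

-- ===== PORT A =====
-- one loop step of A: state is (highlights, article_lines, in_high)
def pvStepA (s : List String × List String × Bool) (ln : String) :
    List String × List String × Bool :=
  if ln == "" then s
  else if PySem.Str.startswith (PySem.Str.lower ln) "@highlight" then (s.1, s.2.1, true)
  else if s.2.2 then (s.1 ++ [ln], s.2.1, s.2.2)
  else (s.1, s.2.1 ++ [ln], s.2.2)

def parse_article_summary_py (raw : String) : String × String :=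
  let lines := (PySem.Str.splitlines raw).map PySem.Str.strip
  let st := lines.foldl pvStepA ([], [], false)
  (PySem.Str.strip (PySem.Str.join " " st.2.1), PySem.Str.strip (PySem.Str.join " " st.1))

-- ===== PORT B =====
def pvIsHigh (ln : String) : Bool := PySem.Str.startswith (PySem.Str.lower ln) "@highlight"

def parse_article_summary_py_alt (raw : String) : String × String :=
  let lines := (PySem.Str.splitlines raw).map PySem.Str.strip
  let article_lines := (lines.takeWhile (fun l => !pvIsHigh l)).filter (fun l => l != "")
  let highlights := (lines.dropWhile (fun l => !pvIsHigh l)).filter (fun l => l != "" && !pvIsHigh l)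
  (PySem.Str.strip (PySem.Str.join " " article_lines), PySem.Str.strip (PySem.Str.join " " highlights))

-- ===== PRECONDITION & SPEC =====
def Spec_parse_article_summary_py (raw : String) (out : String × String) : Prop := out = parse_article_summary_py_alt raw
instance (raw : String) (out : String × String) : Decidable (Spec_parse_article_summary_py raw out) := by unfold Spec_parse_article_summary_py; infer_instance

-- ===== CLAIM (what is proved, stated in full; the proofs are below) =====
def Claim_equal_parse_article_summary_py : Prop := ∀ (raw : String), Dom_parse_article_summary_py raw → Spec_parse_article_summary_py raw (parse_article_summary_py raw)

-- ===== LEMMAS AND PROOFS =====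

-- A's loop step, restated through the pvIsHigh predicate (definitionally equal)
theorem pvStepA_eq (s : List String × List String × Bool) (ln : String) :
    pvStepA s ln =
      if ln == "" then s
      else if pvIsHigh ln then (s.1, s.2.1, true)
      else if s.2.2 then (s.1 ++ [ln], s.2.1, s.2.2)
      else (s.1, s.2.1 ++ [ln], s.2.2) := rfl

theorem pvIsHigh_ne_empty {l : String} (h : pvIsHigh l = true) : (l == "") = false := by
  rcases instDecidableEqString l "" with hne | he
  · simpa using hne
  · subst he; exact absurd h (by decide)

-- once the flag is true, A appends exactly the non-empty non-@highlight lines to highlights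
theorem pvFoldTrue (ls : List String) (h a : List String) :
    ls.foldl pvStepA (h, a, true) =
      (h ++ ls.filter (fun l => l != "" && !pvIsHigh l), a, true) := by
  induction ls generalizing h with
  | nil => simp
  | cons l ls ih =>
    by_cases hl : l = ""
    · subst hl
      simp [List.foldl_cons, pvStepA_eq, ih]
    · have hb : (l == "") = false := by simpa using hl
      by_cases hh : pvIsHigh l = true
      · simp [List.foldl_cons, pvStepA_eq, hb, hh, ih]
      · have hh2 : pvIsHigh l = false := by simpa using hh
        simp [List.foldl_cons, pvStepA_eq, hb, hh2, hl, ih,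
          List.append_assoc]

-- before the flag flips, A appends the non-empty lines to article_lines; the split point is
-- exactly where takeWhile/dropWhile split
theorem pvFoldFalse (ls : List String) (h a : List String) :
    (ls.foldl pvStepA (h, a, false)).1 =
        h ++ (ls.dropWhile (fun l => !pvIsHigh l)).filter (fun l => l != "" && !pvIsHigh l) ∧
    (ls.foldl pvStepA (h, a, false)).2.1 =
        a ++ (ls.takeWhile (fun l => !pvIsHigh l)).filter (fun l => l != "") := by
  induction ls generalizing h a with
  | nil => simp
  | cons l ls ih =>
    by_cases hh : pvIsHigh l = true
    · have hb : (l == "") = false := pvIsHigh_ne_empty hh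
      constructor
      · simp [List.foldl_cons, pvStepA_eq, hb, hh, pvFoldTrue]
      · simp [List.foldl_cons, pvStepA_eq, hb, hh, pvFoldTrue]
    · have hh2 : pvIsHigh l = false := by simpa using hh
      by_cases hl : l = ""
      · subst hl
        simpa [List.foldl_cons, pvStepA_eq, hh2, List.filter_cons] using ih h a
      · have hb : (l == "") = false := by simpa using hl
        rcases ih h (a ++ [l]) with ⟨ih1, ih2⟩
        constructor
        · simpa [List.foldl_cons, pvStepA_eq, hb, hh2] using ih1
        · simp [List.foldl_cons, pvStepA_eq, hb, hh2, ih2, hl,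
            List.append_assoc]

-- ===== VERDICT (by name: the statement is the Claim_ definition above) =====
theorem parse_article_summary_py_spec : Claim_equal_parse_article_summary_py := by
  intro raw _
  unfold Spec_parse_article_summary_py parse_article_summary_py parse_article_summary_py_alt
  rcases pvFoldFalse ((PySem.Str.splitlines raw).map PySem.Str.strip) [] [] with ⟨h1, h2⟩
  simp only [List.nil_append] at h1 h2
  simp only [h1, h2]
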